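-- pv_equiv track=rewrite | github.com/AndrewLishchenko/Main | labs109.py | iterated_remove_pairs
-- ===== SOURCE A (Python) =====
-- def iterated_remove_pairs(items):
--     fail=0
--
--     while fail!=1:
--         fail=1
--         for x in range(len(items)):
--             if items[x-1]==items[x] and x<len(items) and x!=0:
--                 del(items[x])
--                 del(items[x-1])
--                 fail=0
--                 break
--     return(items)
-- ===== SOURCE B (Python) =====
-- def iterated_remove_pairs(items):
--     stack = []
--     for v in items:
--         if stack and stack[-1] == v:
--             stack.pop()
--         else:
--             stack.append(v)
--     return stack
-- ===== Notes on version B (the rewrite author's own statement) =====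
-- stated objective: faster
-- what changed: Replaced the restart-the-scan-after-each-deletion loop with a single-pass stack that pops when the top equals the current element, removing all pairs in one traversal.
import Mathlib
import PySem

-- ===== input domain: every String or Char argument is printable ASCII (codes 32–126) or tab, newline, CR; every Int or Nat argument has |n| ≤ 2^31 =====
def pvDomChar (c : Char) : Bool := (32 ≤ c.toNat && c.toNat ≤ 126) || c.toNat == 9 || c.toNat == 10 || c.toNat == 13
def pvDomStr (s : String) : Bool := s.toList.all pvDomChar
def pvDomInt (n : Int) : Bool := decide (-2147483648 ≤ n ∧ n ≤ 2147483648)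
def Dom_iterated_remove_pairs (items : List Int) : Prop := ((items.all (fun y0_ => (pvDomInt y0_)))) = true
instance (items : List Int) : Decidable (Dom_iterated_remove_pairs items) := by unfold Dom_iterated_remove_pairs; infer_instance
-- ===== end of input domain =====

-- B replaces A's restart-after-each-deletion scan with a single-pass stack (pop when the top
-- equals the current element); A mutates its argument in place, B does not — the equivalence
-- proved here is about the return value only.

-- ===== PORT A =====
-- the inner 'for x in range(len(items))' with its break: first x whose condition holds
def pvAFind (items : List Int) : Option Nat :=
  (List.range items.length).find? (fun x =>
    decide (PySem.List.pyGet? items ((x : Int) - 1) = PySem.List.pyGet? items (x : Int)) &&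
    decide ((x : Int) < (items.length : Int)) && decide (x ≠ 0))

lemma pvAFind_some_lt {items : List Int} {x : Nat} (h : pvAFind items = some x) :
    x ≠ 0 ∧ x < items.length := by
  have hm := List.mem_of_find?_eq_some h
  have hp := List.find?_some h
  simp only [List.mem_range] at hm
  simp only [Bool.and_eq_true, decide_eq_true_eq] at hp
  exact ⟨hp.2, hm⟩

def iterated_remove_pairs (items : List Int) : List Int :=
  match h : pvAFind items with
  | none => items
  | some x => iterated_remove_pairs ((items.eraseIdx x).eraseIdx (x - 1))
termination_by items.length
decreasing_by
  have hx := pvAFind_some_lt h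
  have h1 : (items.eraseIdx x).length = items.length - 1 := by
    rw [List.length_eraseIdx]; simp [hx.2]
  have h2 : ((items.eraseIdx x).eraseIdx (x - 1)).length ≤ (items.eraseIdx x).length := by
    exact List.length_eraseIdx_le _ _
  omega

-- ===== PORT B =====
def pvBStep (stack : List Int) (v : Int) : List Int :=
  match stack with
  | t :: rest => if t = v then rest else v :: t :: rest
  | [] => [v]

def iterated_remove_pairs_alt (items : List Int) : List Int :=
  (items.foldl pvBStep []).reverse

-- ===== PRECONDITION & SPEC =====
def Spec_iterated_remove_pairs (items : List Int) (out : List Int) : Prop := out = iterated_remove_pairs_alt items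
instance (items : List Int) (out : List Int) : Decidable (Spec_iterated_remove_pairs items out) := by unfold Spec_iterated_remove_pairs; infer_instance

-- ===== CLAIM (what is proved, stated in full; the proofs are below) =====
def Claim_equal_iterated_remove_pairs : Prop := ∀ (items : List Int), Dom_iterated_remove_pairs items → Spec_iterated_remove_pairs items (iterated_remove_pairs items)

-- ===== LEMMAS AND PROOFS =====

-- the stack is always free of adjacent equal elements
lemma pvBStep_chain {s : List Int} (h : List.IsChain (· ≠ ·) s) (v : Int) :
    List.IsChain (· ≠ ·) (pvBStep s v) := by
  cases s with
  | nil => simp [pvBStep]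
  | cons t rest =>
    by_cases htv : t = v
    · simpa [pvBStep, htv] using h.tail
    · have hb : pvBStep (t :: rest) v = v :: t :: rest := by simp [pvBStep, htv]
      rw [hb, List.isChain_cons]
      refine ⟨?_, h⟩
      intro y hy
      simp only [List.head?_cons, Option.mem_def, Option.some.injEq] at hy
      subst hy
      exact fun hvt => htv hvt.symm

lemma pvBStep_pvBStep {s : List Int} (h : List.IsChain (· ≠ ·) s) (v : Int) :
    pvBStep (pvBStep s v) v = s := by
  cases s with
  | nil => simp [pvBStep]
  | cons t rest =>
    by_cases htv : t = v
    · subst htv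
      cases rest with
      | nil => simp [pvBStep]
      | cons u r =>
        have htu : t ≠ u := by
          have := (List.isChain_cons.mp h).1
          simpa using this
        simp [pvBStep, Ne.symm htu]
    · simp [pvBStep, htv]

lemma pvFoldl_chain (l : List Int) : ∀ s : List Int, List.IsChain (· ≠ ·) s →
    List.IsChain (· ≠ ·) (List.foldl pvBStep s l) := by
  induction l with
  | nil => intro s h; simpa using h
  | cons v l ih => intro s h; exact ih _ (pvBStep_chain h v)

-- removing one adjacent equal pair anywhere does not change the stack run
lemma pvCancel (a b : List Int) (v : Int) :
    List.foldl pvBStep [] (a ++ v :: v :: b) = List.foldl pvBStep [] (a ++ b) := by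
  have hpf : List.IsChain (· ≠ ·) (List.foldl pvBStep ([] : List Int) a) :=
    pvFoldl_chain a [] (by simp)
  simp only [List.foldl_append, List.foldl_cons]
  rw [pvBStep_pvBStep hpf]

-- on a list with no adjacent equal pair, the run just reverses the list
lemma pvRun_pairfree (l : List Int) (h : List.IsChain (· ≠ ·) l) :
    List.foldl pvBStep [] l = l.reverse := by
  induction l using List.reverseRecOn with
  | nil => simp
  | append_singleton m v ih =>
    rw [List.isChain_append] at h
    rw [List.foldl_append, ih h.1]
    cases hm : m.reverse with
    | nil => simp_all [pvBStep]
    | cons t r =>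
      have hlast : m.getLast? = some t := by
        rw [← List.head?_reverse, hm]; rfl
      have htv : t ≠ v := h.2.2 t hlast v rfl
      simp [pvBStep, htv, hm]

-- pvAFind = none exactly when the list has no adjacent equal pair
lemma pvAFind_none_chain {items : List Int} (h : pvAFind items = none) :
    List.IsChain (· ≠ ·) items := by
  rw [List.isChain_iff_getElem]
  intro i hi
  have hnone := List.find?_eq_none.mp h (i + 1) (by simp; omega)
  simp only [Bool.and_eq_true, decide_eq_true_eq, not_and] at hnone
  intro hEq
  have h1 : ((i + 1 : Nat) : Int) - 1 = (i : Int) := by push_cast; ring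
  have hget : PySem.List.pyGet? items (((i + 1 : Nat) : Int) - 1)
      = PySem.List.pyGet? items ((i + 1 : Nat) : Int) := by
    rw [h1, PySem.List.pyGet?_natCast, PySem.List.pyGet?_natCast,
      List.getElem?_eq_getElem (by omega), List.getElem?_eq_getElem hi, hEq]
  have hlt : ((i + 1 : Nat) : Int) < (items.length : Int) := by exact_mod_cast hi
  have := hnone ⟨hget, hlt⟩
  omega

-- a successful pvAFind yields the pair decomposition
lemma pvAFind_some_eq {items : List Int} {x : Nat} (h : pvAFind items = some x) :
    ∃ hx : x < items.length, x ≠ 0 ∧ items[x - 1]'(by omega) = items[x]'hx := by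
  have hx := pvAFind_some_lt h
  have hp := List.find?_some h
  simp only [Bool.and_eq_true, decide_eq_true_eq] at hp
  refine ⟨hx.2, hx.1, ?_⟩
  have h1 : ((x : Nat) : Int) - 1 = ((x - 1 : Nat) : Int) := by
    have : 1 ≤ x := Nat.one_le_iff_ne_zero.mpr hx.1
    push_cast [this]; ring
  have := hp.1.1
  rw [h1, PySem.List.pyGet?_natCast, PySem.List.pyGet?_natCast,
    List.getElem?_eq_getElem (show x - 1 < items.length by omega),
    List.getElem?_eq_getElem hx.2] at this
  exact Option.some.injEq _ _ ▸ (by simpa using this)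

lemma pvDecomp {items : List Int} {x : Nat} (hx : x < items.length) (hx0 : x ≠ 0)
    (hEq : items[x - 1]'(by omega) = items[x]'hx) :
    items = items.take (x - 1) ++ items[x]'hx :: items[x]'hx :: items.drop (x + 1) := by
  conv_lhs => rw [← List.take_append_drop (x - 1) items]
  congr 1
  rw [List.drop_eq_getElem_cons (by omega)]
  have hstep : x - 1 + 1 = x := by omega
  rw [hstep, List.drop_eq_getElem_cons hx, hEq]

lemma pvErase {items : List Int} {x : Nat} (hx : x < items.length) (hx0 : x ≠ 0) :
    (items.eraseIdx x).eraseIdx (x - 1) = items.take (x - 1) ++ items.drop (x + 1) := by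
  rw [show items.eraseIdx x = items.take x ++ items.drop (x + 1) from
    List.eraseIdx_eq_take_drop_succ ..]
  rw [List.eraseIdx_append_of_lt_length (by simp [List.length_take]; omega),
    List.eraseIdx_eq_take_drop_succ]
  have h2 : x - 1 + 1 = x := by omega
  rw [h2, List.take_take, List.drop_take]
  simp

lemma pvMain : ∀ (n : Nat) (items : List Int), items.length ≤ n →
    iterated_remove_pairs items = iterated_remove_pairs_alt items := by
  intro n
  induction n with
  | zero =>
    intro items h
    have : items = [] := List.eq_nil_of_length_eq_zero (by omega)
    subst this
    rw [iterated_remove_pairs]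
    simp only [iterated_remove_pairs_alt]
    rfl
  | succ n ih =>
    intro items hlen
    rw [iterated_remove_pairs]
    split
    · rename_i hfind
      have hch := pvAFind_none_chain hfind
      simp only [iterated_remove_pairs_alt]
      rw [pvRun_pairfree items hch, List.reverse_reverse]
    · rename_i x hfind
      obtain ⟨hx, hx0, hEq⟩ := pvAFind_some_eq hfind
      have hdec := pvDecomp hx hx0 hEq
      have hera := pvErase hx hx0
      have hlen2 : ((items.eraseIdx x).eraseIdx (x - 1)).length ≤ n := by
        have h1 : (items.eraseIdx x).length = items.length - 1 := by
          rw [List.length_eraseIdx]; simp [hx]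
        have h2 := List.length_eraseIdx_le (items.eraseIdx x) (x - 1)
        omega
      rw [ih _ hlen2]
      simp only [iterated_remove_pairs_alt, hera]
      conv_rhs => rw [hdec]
      rw [pvCancel]

-- ===== VERDICT (by name: the statement is the Claim_ definition above) =====
theorem iterated_remove_pairs_spec : Claim_equal_iterated_remove_pairs := by
  intro items _
  unfold Spec_iterated_remove_pairs
  exact pvMain items.length items le_rfl
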